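-- pv_equiv track=rewrite | github.com/981377660LMT/algorithm-study | 11_动态规划/经典题/公式变形/消息压缩-dp.py | messageCount
-- ===== SOURCE A (Python) =====
-- MOD = 998244353
--
-- def messageCount(N: int) -> int:
--     # write code here
--     if N <= 4:
--         return 0
--     if N <= 9:
--         return 1
--     dp = [0] * (N + 1)
--     dp[5] = 1
--     for i in range(6, N + 1):
--         dp[i] = (dp[i - 1] + dp[i - 5]) % MOD
--     return dp[-1]
-- ===== SOURCE B (Python) =====
-- MOD = 998244353
--
--
-- def _mul(a, b):
--     """5x5 matrix product mod MOD."""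
--     return [[sum(a[i][k] * b[k][j] for k in range(5)) % MOD for j in range(5)]
--             for i in range(5)]
--
--
-- def messageCount(N: int) -> int:
--     if N <= 4:
--         return 0
--     if N <= 9:
--         return 1
--     # state (dp[i], dp[i-1], dp[i-2], dp[i-3], dp[i-4]); dp[5..9] = 1
--     m = [[1, 0, 0, 0, 1],
--          [1, 0, 0, 0, 0],
--          [0, 1, 0, 0, 0],
--          [0, 0, 1, 0, 0],
--          [0, 0, 0, 1, 0]]
--     r = [[1 if i == j else 0 for j in range(5)] for i in range(5)]
--     e = N - 9
--     while e:
--         if e & 1: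
--             r = _mul(r, m)
--         m = _mul(m, m)
--         e >>= 1
--     # dp[N] = first row of m^(N-9) applied to (1,1,1,1,1)
--     return sum(r[0]) % MOD
-- ===== Notes on version B (the rewrite author's own statement) =====
-- stated objective: faster
-- what changed: Replaces the O(N) dp-array loop with binary exponentiation of the 5x5 companion matrix of the recurrence dp[i]=dp[i-1]+dp[i-5] modulo the fixed prime, summing the first row of the (N-9)-th matrix power.
import Mathlib
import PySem

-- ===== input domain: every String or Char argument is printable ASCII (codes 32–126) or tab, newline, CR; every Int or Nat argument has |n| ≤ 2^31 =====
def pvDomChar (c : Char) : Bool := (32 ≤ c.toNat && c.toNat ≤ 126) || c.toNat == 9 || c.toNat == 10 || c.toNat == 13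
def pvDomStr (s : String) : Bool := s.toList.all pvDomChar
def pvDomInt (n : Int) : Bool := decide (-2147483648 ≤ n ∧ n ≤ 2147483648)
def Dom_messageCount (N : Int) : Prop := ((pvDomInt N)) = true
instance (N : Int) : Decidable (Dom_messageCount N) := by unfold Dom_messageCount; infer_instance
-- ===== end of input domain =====

-- B replaces A's O(N) dp-array loop by binary exponentiation of the 5x5 transition matrix modulo the fixed prime; equal return value for every N.


-- ===== PORT A =====
-- literal transliteration of A: dp array of length N+1, dp[5]=1, dp[i]=(dp[i-1]+dp[i-5])%MOD, return dp[-1].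
-- dp[i-1]/dp[i-5]/dp[i]=… use pyGetD/pySetD: the indices are always in range here (5 ≤ i-5, i ≤ N < len),
-- so the total forms are exact.
def messageCount (N : Int) : Int :=
  if N ≤ 4 then 0
  else if N ≤ 9 then 1
  else
    let dp0 := PySem.List.pySetD (List.replicate (N + 1).toNat (0 : Int)) 5 1
    let dp := (PySem.List.pyRange 6 (N + 1) 1).foldl
      (fun L i =>
        PySem.List.pySetD L i
          (PySem.Int.mod (PySem.List.pyGetD L (i - 1) 0 + PySem.List.pyGetD L (i - 5) 0) 998244353))
      dp0
    PySem.List.pyGetD dp (-1) 0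

-- ===== PORT B =====
-- Source B's 5x5 matrices are lists of 5 rows of 5 ints, exactly as in Python.
-- a[i][j] on the always-in-range indices used here:
def pvE (m : List (List Int)) (i j : Nat) : Int := (m.getD i []).getD j 0

-- sum(a[i][k]*b[k][j] for k in range(5)): the fixed range(5) sum, written out term by term
def pvMul (a b : List (List Int)) : List (List Int) :=
  (List.range 5).map fun i => (List.range 5).map fun j =>
    PySem.Int.mod
      (pvE a i 0 * pvE b 0 j + pvE a i 1 * pvE b 1 j + pvE a i 2 * pvE b 2 j +
        pvE a i 3 * pvE b 3 j + pvE a i 4 * pvE b 4 j)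
      998244353

-- the while-loop 'while e: if e & 1: r = r*m; m = m*m; e >>= 1' on the nonnegative e, as binary
-- recursion; 'fuel' only bounds the recursion depth for structural termination (e halves each turn,
-- so fuel = the initial e always suffices) — it changes no computed value.
def pvPow (fuel : Nat) (r m : List (List Int)) (e : Nat) : List (List Int) :=
  match fuel with
  | 0 => r
  | fuel + 1 =>
    if e = 0 then r
    else pvPow fuel (if e % 2 = 1 then pvMul r m else r) (pvMul m m) (e / 2)

def pvM : List (List Int) :=
  [[1,0,0,0,1], [1,0,0,0,0], [0,1,0,0,0], [0,0,1,0,0], [0,0,0,1,0]]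

-- [[1 if i == j else 0 for j in range(5)] for i in range(5)]
def pvId : List (List Int) :=
  (List.range 5).map fun i => (List.range 5).map fun j => if i = j then 1 else 0

def messageCount_alt (N : Int) : Int :=
  if N ≤ 4 then 0
  else if N ≤ 9 then 1
  else
    let r := pvPow (N - 9).toNat pvId pvM (N - 9).toNat   -- e = N - 9 ≥ 1
    PySem.Int.mod (pvE r 0 0 + pvE r 0 1 + pvE r 0 2 + pvE r 0 3 + pvE r 0 4) 998244353  -- sum(r[0])

-- ===== PRECONDITION & SPEC =====
def Spec_messageCount (N : Int) (out : Int) : Prop := out = messageCount_alt N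
instance (N : Int) (out : Int) : Decidable (Spec_messageCount N out) := by unfold Spec_messageCount; infer_instance

-- ===== CLAIM (what is proved, stated in full; the proofs are below) =====
def Claim_equal_messageCount : Prop := ∀ (N : Int), Dom_messageCount N → Spec_messageCount N (messageCount N)

-- ===== LEMMAS AND PROOFS =====

-- reference value: A's dp[n]
def pvA (n : Nat) : Int :=
  if n < 5 then 0
  else if n < 10 then 1
  else PySem.Int.mod (pvA (n - 1) + pvA (n - 5)) 998244353
termination_by n
decreasing_by all_goals omega

lemma pvA_bounds (n : Nat) : 0 ≤ pvA n ∧ pvA n < 998244353 := by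
  induction n using Nat.strong_induction_on with
  | _ n ih =>
    rw [pvA]
    split
    · norm_num
    · split
      · norm_num
      · exact ⟨PySem.Int.mod_nonneg _ (by norm_num), PySem.Int.mod_lt _ (by norm_num)⟩

lemma pvA_rec (n : Nat) (h : 6 ≤ n) :
    pvA n = PySem.Int.mod (pvA (n - 1) + pvA (n - 5)) 998244353 := by
  by_cases h10 : n < 10
  · interval_cases n <;> simp [pvA]
  · rw [pvA]; simp [h10]; omega

-- ZMod side
def pvToZ (a : List (List Int)) : Matrix (Fin 5) (Fin 5) (ZMod 998244353) :=
  Matrix.of fun i j => ((pvE a i.val j.val : Int) : ZMod 998244353)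

lemma pv_cast_mod (x : Int) :
    ((PySem.Int.mod x 998244353 : Int) : ZMod 998244353) = (x : ZMod 998244353) := by
  rw [PySem.Int.mod_eq_emod_of_pos (by norm_num),
    show ((998244353:Int)) = ((998244353:Nat):Int) from rfl, ZMod.intCast_mod]

lemma pvE_map_range (f : Nat → List Int) (i : Nat) (hi : i < 5) (j : Nat) :
    pvE ((List.range 5).map f) i j = (f i).getD j 0 := by
  have h : ((List.range 5).map f).getD i [] = f i := by
    rw [List.getD_eq_getElem _ _ (by simpa using hi), List.getElem_map, List.getElem_range]
  rw [pvE, h]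

lemma pvToZ_mul (a b : List (List Int)) : pvToZ (pvMul a b) = pvToZ a * pvToZ b := by
  funext i j
  show ((pvE (pvMul a b) i.val j.val : Int) : ZMod 998244353) = _
  rw [pvMul, pvE_map_range _ _ i.isLt,
    List.getD_eq_getElem _ _ (by simp [j.isLt]), List.getElem_map, List.getElem_range]
  rw [pv_cast_mod]
  simp only [Matrix.mul_apply, Fin.sum_univ_five]
  push_cast
  rfl

lemma pvToZ_id : pvToZ pvId = 1 := by
  funext i j
  show ((pvE pvId i.val j.val : Int) : ZMod 998244353) = _
  rw [pvId, pvE_map_range _ _ i.isLt,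
    List.getD_eq_getElem _ _ (by simp [j.isLt]), List.getElem_map, List.getElem_range]
  rw [Matrix.one_apply]
  by_cases h : i = j
  · rw [if_pos h, if_pos (by rw [h]), Int.cast_one]
  · rw [if_neg h, if_neg (fun hv => h (Fin.ext hv)), Int.cast_zero]

lemma pvToZ_pow (fuel : Nat) : ∀ (e : Nat) (r m : List (List Int)), e ≤ fuel →
    pvToZ (pvPow fuel r m e) = pvToZ r * pvToZ m ^ e := by
  induction fuel with
  | zero =>
    intro e r m he
    rw [show e = 0 by omega, pvPow]
    simp
  | succ fuel ih =>
    intro e r m he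
    rw [pvPow]
    by_cases h0 : e = 0
    · simp [h0]
    · rw [if_neg h0, ih (e / 2) _ _ (by omega)]
      by_cases h1 : e % 2 = 1
      · rw [if_pos h1, pvToZ_mul, pvToZ_mul, ← pow_two, ← pow_mul, mul_assoc, ← pow_succ',
          show 2 * (e / 2) + 1 = e by omega]
      · rw [if_neg h1, pvToZ_mul, ← pow_two, ← pow_mul, show 2 * (e / 2) = e by omega]

def pvOnes : Fin 5 → ZMod 998244353 := fun _ => 1

def pvFZ (n : Nat) : ZMod 998244353 := ((pvA n : Int) : ZMod 998244353)

lemma pvFZ_rec (n : Nat) (h : 6 ≤ n) : pvFZ n = pvFZ (n - 1) + pvFZ (n - 5) := by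
  unfold pvFZ
  rw [pvA_rec n h, pv_cast_mod]
  push_cast
  ring

lemma pvPow_vec (k : Nat) :
    (pvToZ pvM ^ k).mulVec pvOnes = fun i : Fin 5 => pvFZ (9 + k - i.val) := by
  induction k with
  | zero =>
    funext i
    fin_cases i <;> simp [Matrix.one_mulVec, pvOnes, pvFZ, pvA]
  | succ k ih =>
    rw [pow_succ', ← Matrix.mulVec_mulVec, ih]
    funext i
    fin_cases i <;>
      simp [pvToZ, pvM, pvE, Matrix.mulVec, dotProduct, Fin.sum_univ_five]
    · rw [pvFZ_rec (9 + (k + 1)) (by omega)]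
      have h1 : 9 + (k + 1) - 1 = 9 + k := by omega
      have h5 : 9 + (k + 1) - 5 = 9 + k - 4 := by omega
      rw [h1, h5]
    all_goals (congr 1 <;> omega)

-- A's loop body, named for the proofs (the port writes it inline)
def pvStep (L : List Int) (i : Int) : List Int :=
  PySem.List.pySetD L i
    (PySem.Int.mod (PySem.List.pyGetD L (i - 1) 0 + PySem.List.pyGetD L (i - 5) 0) 998244353)

lemma pv_getD_set (xs : List Int) (n j : Nat) (v : Int) (hn : n < xs.length) :
    (xs.set n v).getD j 0 = if j = n then v else xs.getD j 0 := by
  by_cases hj : j = n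
  · subst hj
    rw [List.getD_eq_getElem _ _ (by simpa using hn)]
    simp
  · simp [List.getD, hj, Ne.symm hj]

lemma pvA_inv (len : Nat) (hlen : 10 ≤ len) :
    ∀ t : Nat, 6 + t ≤ len →
    (((PySem.List.pyRange 6 (6 + (t : Int)) 1).foldl pvStep
        (PySem.List.pySetD (List.replicate len (0 : Int)) 5 1)).length = len) ∧
    ∀ j : Nat, j < len →
      ((PySem.List.pyRange 6 (6 + (t : Int)) 1).foldl pvStep
        (PySem.List.pySetD (List.replicate len (0 : Int)) 5 1)).getD j 0 =
        if j < 6 + t then pvA j else 0 := by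
  intro t
  induction t with
  | zero =>
    intro ht
    rw [show ((6 : Int) + ((0 : Nat) : Int)) = 6 by norm_num,
      PySem.List.pyRange_one_eq_nil le_rfl, List.foldl_nil,
      show ((5 : Int)) = ((5 : Nat) : Int) from rfl, PySem.List.pySetD_natCast]
    constructor
    · simp
    · intro j hj
      rw [pv_getD_set _ _ _ _ (by simp; omega)]
      by_cases h5 : j = 5
      · subst h5; simp [pvA]
      · rw [if_neg h5]
        by_cases h6 : j < 6 + 0
        · rw [if_pos h6]
          simp [List.getD, hj, pvA, show j < 5 by omega]
        · rw [if_neg h6]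
          simp [List.getD, hj]
  | succ t ih =>
    intro ht
    have ih' := ih (by omega)
    obtain ⟨hL, hj⟩ := ih'
    rw [show ((6 : Int) + ((t + 1 : Nat) : Int)) = (6 + (t : Int)) + 1 by push_cast; ring,
      PySem.List.pyRange_one_succ_right (by omega), List.foldl_append, List.foldl_cons,
      List.foldl_nil]
    set L := (PySem.List.pyRange 6 (6 + (t : Int)) 1).foldl pvStep
      (PySem.List.pySetD (List.replicate len (0 : Int)) 5 1) with hLdef
    have e1 : (6 : Int) + (t : Int) - 1 = ((5 + t : Nat) : Int) := by push_cast; ring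
    have e5 : (6 : Int) + (t : Int) - 5 = ((1 + t : Nat) : Int) := by push_cast; ring
    have e0 : (6 : Int) + (t : Int) = ((6 + t : Nat) : Int) := by push_cast; ring
    have hv1 : PySem.List.pyGetD L ((6 : Int) + (t : Int) - 1) 0 = pvA (5 + t) := by
      rw [e1, PySem.List.pyGetD_natCast, hj (5 + t) (by omega), if_pos (by omega)]
    have hv5 : PySem.List.pyGetD L ((6 : Int) + (t : Int) - 5) 0 = pvA (1 + t) := by
      rw [e5, PySem.List.pyGetD_natCast, hj (1 + t) (by omega), if_pos (by omega)]
    have hval : PySem.Int.mod (pvA (5 + t) + pvA (1 + t)) 998244353 = pvA (6 + t) := by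
      rw [pvA_rec (6 + t) (by omega), show 6 + t - 1 = 5 + t by omega,
        show 6 + t - 5 = 1 + t by omega]
    rw [pvStep, hv1, hv5, hval, e0, PySem.List.pySetD_natCast]
    constructor
    · simpa using hL
    · intro j hjlen
      rw [pv_getD_set _ _ _ _ (by rw [hL]; omega)]
      by_cases hje : j = 6 + t
      · subst hje
        rw [if_pos rfl, if_pos (by omega)]
      · rw [if_neg hje, hj j hjlen]
        by_cases hlt : j < 6 + t
        · rw [if_pos hlt, if_pos (by omega)]
        · rw [if_neg hlt, if_neg (by omega)]

lemma pvA_big (n : Nat) (hn : 10 ≤ n) : messageCount ((n : Int)) = pvA n := by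
  have h4 : ¬((n : Int) ≤ 4) := by omega
  have h9 : ¬((n : Int) ≤ 9) := by omega
  simp only [messageCount, if_neg h4, if_neg h9]
  rw [show (fun (L : List Int) (i : Int) => PySem.List.pySetD L i
      (PySem.Int.mod (PySem.List.pyGetD L (i - 1) 0 + PySem.List.pyGetD L (i - 5) 0)
        998244353)) = pvStep from rfl]
  rw [show ((n : Int) + 1).toNat = n + 1 by omega,
    show ((n : Int) + 1) = 6 + ((n - 5 : Nat) : Int) by push_cast [Nat.cast_sub (by omega : 5 ≤ n)]; ring]
  obtain ⟨hL, hj⟩ := pvA_inv (n + 1) (by omega) (n - 5) (by omega)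
  set L := (PySem.List.pyRange 6 (6 + ((n - 5 : Nat) : Int)) 1).foldl pvStep
    (PySem.List.pySetD (List.replicate (n + 1) (0 : Int)) 5 1) with hLdef
  have hne : L ≠ [] := by
    intro hnil
    rw [hnil] at hL
    simp at hL
  rw [PySem.List.pyGetD_neg_one L 0 hne, List.getLast_eq_getElem,
    ← List.getD_eq_getElem L 0 (by omega)]
  rw [hj (L.length - 1) (by omega), hL, show n + 1 - 1 = n by omega,
    if_pos (show n < 6 + (n - 5) by omega)]

lemma pv_cast_inj (a b : Int) (ha0 : 0 ≤ a) (ha : a < 998244353) (hb0 : 0 ≤ b)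
    (hb : b < 998244353) (h : (a : ZMod 998244353) = (b : ZMod 998244353)) : a = b := by
  have h2 := (ZMod.intCast_eq_intCast_iff a b 998244353).mp h
  rw [Int.ModEq] at h2
  rw [Int.emod_eq_of_lt ha0 (by exact_mod_cast ha),
    Int.emod_eq_of_lt hb0 (by exact_mod_cast hb)] at h2
  exact h2

lemma pvB_big (n : Nat) (hn : 10 ≤ n) : messageCount_alt ((n : Int)) = pvA n := by
  have h4 : ¬((n : Int) ≤ 4) := by omega
  have h9 : ¬((n : Int) ≤ 9) := by omega
  simp only [messageCount_alt, if_neg h4, if_neg h9]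
  rw [show ((n : Int) - 9).toNat = n - 9 by omega]
  apply pv_cast_inj _ _ (PySem.Int.mod_nonneg _ (by norm_num))
    (PySem.Int.mod_lt _ (by norm_num)) (pvA_bounds n).1 (pvA_bounds n).2
  rw [pv_cast_mod]
  push_cast
  have hP : pvToZ (pvPow (n - 9) pvId pvM (n - 9)) = pvToZ pvM ^ (n - 9) := by
    rw [pvToZ_pow (n - 9) (n - 9) _ _ le_rfl, pvToZ_id, one_mul]
  have hv := congrFun (pvPow_vec (n - 9)) 0
  simp only [Matrix.mulVec, dotProduct, pvOnes, mul_one, Fin.sum_univ_five] at hv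
  have hj0 : ∀ j : Fin 5, ((pvE (pvPow (n - 9) pvId pvM (n - 9)) 0 j.val : Int) : ZMod 998244353) =
      (pvToZ pvM ^ (n - 9)) 0 j := fun j => by rw [← hP]; rfl
  rw [show ((pvE (pvPow (n - 9) pvId pvM (n - 9)) 0 0 : Int) : ZMod 998244353) =
        (pvToZ pvM ^ (n - 9)) 0 0 from hj0 0,
    show ((pvE (pvPow (n - 9) pvId pvM (n - 9)) 0 1 : Int) : ZMod 998244353) =
        (pvToZ pvM ^ (n - 9)) 0 1 from hj0 1,
    show ((pvE (pvPow (n - 9) pvId pvM (n - 9)) 0 2 : Int) : ZMod 998244353) =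
        (pvToZ pvM ^ (n - 9)) 0 2 from hj0 2,
    show ((pvE (pvPow (n - 9) pvId pvM (n - 9)) 0 3 : Int) : ZMod 998244353) =
        (pvToZ pvM ^ (n - 9)) 0 3 from hj0 3,
    show ((pvE (pvPow (n - 9) pvId pvM (n - 9)) 0 4 : Int) : ZMod 998244353) =
        (pvToZ pvM ^ (n - 9)) 0 4 from hj0 4,
    hv, show 9 + (n - 9) - ((0 : Fin 5) : Nat) = n by omega]
  rfl

-- ===== VERDICT (by name: the statement is the Claim_ definition above) =====
theorem messageCount_spec : Claim_equal_messageCount := by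
  intro N _
  unfold Spec_messageCount
  by_cases h4 : N ≤ 4
  · simp [messageCount, messageCount_alt, h4]
  · by_cases h9 : N ≤ 9
    · simp [messageCount, messageCount_alt, h4, h9]
    · rw [show N = ((N.toNat : Nat) : Int) by omega,
        pvA_big _ (by omega), pvB_big _ (by omega)]
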